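-- pv_equiv track=rewrite | github.com/limteng-rpi/ir_final | src/ner/util.py | restore_order
-- ===== SOURCE A (Python) =====
-- def restore_order(items, indices):
--     items_new = []
--     for item in items:
--         item = sorted([(i, v) for v, i in zip(item, indices)],
--                       key=lambda x: x[0])
--         item = [v for i, v in item]
--         items_new.append(item)
--     return items_new
-- ===== SOURCE B (Python) =====
-- def restore_order(items, indices):
--     n = len(indices)
--     cache = {}
--     items_new = []
--     for item in items:
--         t = len(item) if len(item) < n else n
--         ord_t = cache.get(t)
--         if ord_t is None:
--             ord_t = sorted(range(t), key=lambda j: indices[j])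
--             cache[t] = ord_t
--         items_new.append([item[j] for j in ord_t])
--     return items_new
-- ===== Notes on version B (the rewrite author's own statement) =====
-- stated objective: faster
-- what changed: B computes the stable argsort of the relevant prefix of indices once per distinct row length (memoized in a dict) and applies that permutation to each row, instead of building and sorting an (index,value) pair list for every row.
import Mathlib
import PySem

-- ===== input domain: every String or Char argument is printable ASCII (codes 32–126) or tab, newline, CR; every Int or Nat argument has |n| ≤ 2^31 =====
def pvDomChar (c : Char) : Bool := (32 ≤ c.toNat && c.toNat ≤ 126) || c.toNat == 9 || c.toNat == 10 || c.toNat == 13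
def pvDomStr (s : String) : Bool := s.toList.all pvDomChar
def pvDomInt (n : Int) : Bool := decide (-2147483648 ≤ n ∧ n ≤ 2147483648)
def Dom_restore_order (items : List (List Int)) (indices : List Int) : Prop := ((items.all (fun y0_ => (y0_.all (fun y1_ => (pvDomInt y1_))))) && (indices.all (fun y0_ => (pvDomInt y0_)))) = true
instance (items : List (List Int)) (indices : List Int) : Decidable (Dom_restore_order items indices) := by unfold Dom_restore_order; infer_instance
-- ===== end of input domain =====

-- B computes the stable argsort of the relevant prefix of `indices` once per distinct
-- row length (cached in a dict) and applies it to each row, instead of building and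
-- sorting an (index, value) pair list for every row: faster when rows share lengths.

-- ===== PORT A =====
def restore_order (items : List (List Int)) (indices : List Int) : List (List Int) :=
  items.foldl (fun items_new item =>
    let pairs := (item.zip indices).map (fun vi => (vi.2, vi.1))
    let item1 := PySem.List.sorted pairs (fun x => x.1)
    let item2 := item1.map (fun iv => iv.2)
    items_new ++ [item2]) []

-- ===== PORT B =====
def restore_order_alt (items : List (List Int)) (indices : List Int) : List (List Int) :=
  let n : Int := (indices.length : Int)
  (items.foldl (fun (st : PySem.Dict Int (List Int) × List (List Int)) item =>
      let t : Int := if (item.length : Int) < n then (item.length : Int) else n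
      match st.1.get? t with
      | some ordt => (st.1, st.2 ++ [ordt.map (fun j => PySem.List.pyGetD item j 0)])
      | none =>
          let ordt := PySem.List.sorted (PySem.List.pyRange 0 t)
                        (fun j => PySem.List.pyGetD indices j 0)
          (st.1.insert t ordt, st.2 ++ [ordt.map (fun j => PySem.List.pyGetD item j 0)]))
    (PySem.Dict.empty, [])).2

-- ===== PRECONDITION & SPEC =====
def Spec_restore_order (items : List (List Int)) (indices : List Int) (out : List (List Int)) : Prop := out = restore_order_alt items indices
instance (items : List (List Int)) (indices : List Int) (out : List (List Int)) : Decidable (Spec_restore_order items indices out) := by unfold Spec_restore_order; infer_instance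

-- ===== CLAIM (what is proved, stated in full; the proofs are below) =====
def Claim_equal_restore_order : Prop := ∀ (items : List (List Int)) (indices : List Int), Dom_restore_order items indices → Spec_restore_order items indices (restore_order items indices)

-- ===== LEMMAS AND PROOFS =====

-- the canonical argsort of the first t positions of `indices` (proof-side abbreviation)
def pvCanon (indices : List Int) (t : Int) : List Int :=
  PySem.List.sorted (PySem.List.pyRange 0 t) (fun j => PySem.List.pyGetD indices j 0)

-- insertBy commutes with map (the comparison reads only through g).
theorem pv_insertBy_map {α β : Type} (g : α → β) (bef : β → β → Bool) (x : α) (ys : List α) :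
    PySem.List.insertBy bef (g x) (ys.map g)
      = (PySem.List.insertBy (fun a b => bef (g a) (g b)) x ys).map g := by
  induction ys with
  | nil => simp [PySem.List.insertBy]
  | cons y ys ih =>
      simp only [List.map_cons, PySem.List.insertBy]
      split <;> simp_all

theorem pv_foldl_ins_map {α β κ : Type} [LT κ] [DecidableLT κ] (g : α → β) (key : β → κ)
    (xs : List α) (acc : List α) :
    List.foldl (fun acc x => PySem.List.insertBy (fun a b => decide (key a < key b)) x acc)
        (acc.map g) (xs.map g)
      = (List.foldl (fun acc x =>
          PySem.List.insertBy (fun a b => decide (key (g a) < key (g b))) x acc) acc xs).map g := by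
  induction xs generalizing acc with
  | nil => simp
  | cons x xs ih =>
      simp only [List.map_cons, List.foldl_cons]
      rw [pv_insertBy_map g (fun a b => decide (key a < key b)) x acc, ih]

-- A stable sort of a mapped list is the mapped stable sort under the composed key.
theorem pv_sorted_map {α β κ : Type} [LT κ] [DecidableLT κ] (g : α → β) (key : β → κ)
    (xs : List α) :
    PySem.List.sorted (xs.map g) key
      = (PySem.List.sorted xs (fun a => key (g a))).map g := by
  rw [PySem.List.sorted_eq_foldl_insertBy, PySem.List.sorted_eq_foldl_insertBy]
  simpa using pv_foldl_ins_map g key xs []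

theorem pv_zip_eq_map_range (xs ys : List Int) :
    xs.zip ys
      = (List.range (min xs.length ys.length)).map (fun k => (xs.getD k 0, ys.getD k 0)) := by
  induction xs generalizing ys with
  | nil => simp
  | cons x xs ih =>
      cases ys with
      | nil => simp
      | cons y ys =>
          simp only [List.zip_cons_cons, List.length_cons, Nat.succ_min_succ,
            List.range_succ_eq_map, List.map_cons, List.getD_cons_zero, List.map_map]
          rw [ih ys]
          rfl

-- the truncation length B computes, as a Nat minimum
theorem pv_t_eq (item indices : List Int) :
    (if (item.length : Int) < (indices.length : Int) then (item.length : Int)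
      else (indices.length : Int))
      = ((min item.length indices.length : Nat) : Int) := by
  split <;> push_cast <;> omega

-- the per-row identity: A's pair-sort of one row equals mapping the row through pvCanon
theorem pv_row_eq (item indices : List Int) :
    (PySem.List.sorted ((item.zip indices).map (fun vi => (vi.2, vi.1))) (fun x => x.1)).map
        (fun iv => iv.2)
      = (pvCanon indices ((min item.length indices.length : Nat) : Int)).map
          (fun j => PySem.List.pyGetD item j 0) := by
  rw [pv_zip_eq_map_range, List.map_map, pv_sorted_map, List.map_map]
  unfold pvCanon
  rw [PySem.List.pyRange_zero_nat, pv_sorted_map, List.map_map]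
  simp [Function.comp]

-- loop invariant for B's fold: every cache entry is the canonical argsort of its key,
-- and the accumulated output is the mapped rows so far.
theorem pv_alt_loop (indices : List Int) (items : List (List Int))
    (d : PySem.Dict Int (List Int)) (acc : List (List Int))
    (hinv : ∀ t o, d.get? t = some o → o = pvCanon indices t) :
    (items.foldl (fun (st : PySem.Dict Int (List Int) × List (List Int)) item =>
      let t : Int := if (item.length : Int) < (indices.length : Int) then (item.length : Int)
        else (indices.length : Int)
      match st.1.get? t with
      | some ordt => (st.1, st.2 ++ [ordt.map (fun j => PySem.List.pyGetD item j 0)])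
      | none =>
          let ordt := PySem.List.sorted (PySem.List.pyRange 0 t)
                        (fun j => PySem.List.pyGetD indices j 0)
          (st.1.insert t ordt, st.2 ++ [ordt.map (fun j => PySem.List.pyGetD item j 0)]))
      (d, acc)).2
    = acc ++ items.map (fun item =>
        (pvCanon indices (if (item.length : Int) < (indices.length : Int) then (item.length : Int)
          else (indices.length : Int))).map (fun j => PySem.List.pyGetD item j 0)) := by
  induction items generalizing d acc with
  | nil => simp
  | cons item items ih =>
      simp only [List.foldl_cons, List.map_cons]
      set t : Int := if (item.length : Int) < (indices.length : Int) then (item.length : Int)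
        else (indices.length : Int) with ht
      cases hc : d.get? t with
      | some ordt =>
          dsimp only
          rw [ih d (acc ++ _) hinv, hinv t ordt hc]
          simp
      | none =>
          dsimp only
          rw [ih _ (acc ++ _) ?_]
          · simp [pvCanon]
          · intro t' o ho
            rw [PySem.Dict.get?_insert] at ho
            split at ho
            · cases ho; subst ‹t' = t›; rfl
            · exact hinv t' o ho

-- ===== VERDICT (by name: the statement is the Claim_ definition above) =====
theorem restore_order_spec : Claim_equal_restore_order := by
  unfold Claim_equal_restore_order
  intro items indices _
  unfold Spec_restore_order restore_order restore_order_alt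
  simp only []
  rw [PySem.List.foldl_append_singleton_eq_map
    (fun item => (PySem.List.sorted ((item.zip indices).map (fun vi => (vi.2, vi.1)))
        (fun x => x.1)).map (fun iv => iv.2)) items []]
  rw [pv_alt_loop indices items PySem.Dict.empty []
    (by intro t o h; rw [PySem.Dict.get?_empty] at h; cases h)]
  simp only [List.nil_append]
  refine List.map_congr_left (fun item _ => ?_)
  rw [pv_row_eq, pv_t_eq]
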